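-- pv_equiv track=rewrite | github.com/Haotian-RA/recursive_filtering_new | measurement/data_analyze.py | select_median_repetition
-- ===== SOURCE A (Python) =====
-- def select_median_repetition(run_data):
--     """
--     Select the single repetition whose Core cyc lies in the middle (median).
--     If multiple repetitions have the same median Core cyc, choose the first one.
--
--     Args:
--         run_data (dict): Dictionary with column names as keys and lists of repetition values
--
--     Returns:
--         dict: Dictionary with column names as keys and single selected values, or None if failed
--     """
--     if "Core cyc" not in run_data or not run_data["Core cyc"]:
--         return None
--
--     core_cyc_values = run_data["Core cyc"]
--
--     if len(core_cyc_values) == 0: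
--         return None
--
--     # Find the median Core cyc value
--     sorted_core_cyc = sorted(core_cyc_values)
--     n = len(sorted_core_cyc)
--
--     if n % 2 == 0:
--         # Even number of values - use the lower of the two middle values
--         median_core_cyc = sorted_core_cyc[n//2 - 1]
--     else:
--         # Odd number of values - use the middle value
--         median_core_cyc = sorted_core_cyc[n//2]
--
--     # Find the FIRST repetition that has this median Core cyc value
--     selected_index = None
--     for i, core_cyc_val in enumerate(core_cyc_values):
--         if core_cyc_val == median_core_cyc:
--             selected_index = i
--             break  # Take the first occurrence
--
--     # If no exact match (shouldn't happen), find the closest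
--     if selected_index is None:
--         closest_diff = float('inf')
--         selected_index = 0
--         for i, core_cyc_val in enumerate(core_cyc_values):
--             diff = abs(core_cyc_val - median_core_cyc)
--             if diff < closest_diff:
--                 closest_diff = diff
--                 selected_index = i
--
--     # Extract the values from the selected repetition for all columns
--     selected_values = {}
--     for col_name, col_data in run_data.items():
--         if selected_index < len(col_data):
--             selected_values[col_name] = col_data[selected_index]
--         else:
--             selected_values[col_name] = None
--
--     return selected_values
-- ===== SOURCE B (Python) =====
-- def _qsel(xs, k):
--     # k-th smallest of non-empty xs (0 <= k < len(xs)), quickselect with middle pivot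
--     p = xs[len(xs) // 2]
--     lt = [x for x in xs if x < p]
--     if k < len(lt):
--         return _qsel(lt, k)
--     eqs = [x for x in xs if x == p]
--     if k < len(lt) + len(eqs):
--         return p
--     gt = [x for x in xs if x > p]
--     return _qsel(gt, k - len(lt) - len(eqs))
--
--
-- def select_median_repetition(run_data):
--     core = run_data.get("Core cyc")
--     if not core:
--         return None
--     median = _qsel(core, (len(core) - 1) // 2)
--     idx = core.index(median)
--     return {col: (vals[idx] if idx < len(vals) else None)
--             for col, vals in run_data.items()}
-- ===== Notes on version B (the rewrite author's own statement) =====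
-- stated objective: alternative
-- what changed: B replaces A's full sort plus even/odd median-index branching and manual first-occurrence/closest-match scans by a quickselect for the single lower-median order statistic (index (n-1)//2) followed by list.index; the dead 'closest' fallback loop disappears.
import Mathlib
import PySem

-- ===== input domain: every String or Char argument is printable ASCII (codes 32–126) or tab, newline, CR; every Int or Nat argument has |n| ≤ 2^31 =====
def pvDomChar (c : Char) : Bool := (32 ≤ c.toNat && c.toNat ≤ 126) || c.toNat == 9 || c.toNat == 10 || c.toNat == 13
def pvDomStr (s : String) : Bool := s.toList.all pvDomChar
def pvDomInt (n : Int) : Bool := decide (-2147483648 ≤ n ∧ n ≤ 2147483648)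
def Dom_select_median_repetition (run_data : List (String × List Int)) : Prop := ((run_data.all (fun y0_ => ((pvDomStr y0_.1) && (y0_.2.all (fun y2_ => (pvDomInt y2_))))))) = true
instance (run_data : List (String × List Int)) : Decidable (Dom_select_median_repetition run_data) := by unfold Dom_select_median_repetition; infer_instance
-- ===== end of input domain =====

-- B replaces A's full sort (then branchy median-index pick) by a quickselect for the
-- lower-median order statistic; objective: alternative algorithm (selection instead of sorting).


-- ===== PORT A =====
-- A's first-occurrence loop: 'for i, v in enumerate(core): if v == median: selected_index = i; break'
def findFirstA : List Int → Int → Nat → Option Nat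
  | [], _, _ => none
  | x :: t, v, i => if x = v then some i else findFirstA t v (i + 1)

-- A's 'closest' fallback loop; float('inf') is rendered as `none` (greater than every Int),
-- exact because closest_diff only ever holds Int differences after the first iteration.
def closestA (xs : List Int) (m : Int) : Nat :=
  (xs.foldl
    (fun (st : Option Nat × Nat × Nat) x =>
      let diff := |x - m|
      match st.1 with
      | none => (some diff.toNat, st.2.2, st.2.2 + 1)
      | some cd => if diff < (cd : Int) then (some diff.toNat, st.2.2, st.2.2 + 1)
                   else (st.1, st.2.1, st.2.2 + 1))
    (none, 0, 0)).2.1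

def select_median_repetition (run_data : List (String × List Int)) : Option (List (String × Option Int)) :=
  match (PySem.Dict.mk run_data).get? "Core cyc" with
  | none => none                       -- "Core cyc" not in run_data
  | some core =>
    if core = [] then none             -- not run_data["Core cyc"]
    else if core.length = 0 then none  -- A's redundant second emptiness check
    else
      let sortedc := PySem.List.sorted core (fun x => x)
      let n := sortedc.length
      -- indices n/2 - 1 (n even, n ≥ 2) and n/2 are in range, so plain Nat getD is exact
      let median := if n % 2 = 0 then sortedc.getD (n / 2 - 1) 0 else sortedc.getD (n / 2) 0
      let idx : Nat :=
        match findFirstA core median 0 with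
        | some i => i
        | none => closestA core median
      some (run_data.map (fun cv => (cv.1, if idx < cv.2.length then some (cv.2.getD idx 0) else none)))

-- ===== PORT B =====
-- quickselect with middle pivot: k-th smallest of a non-empty list
def qselB : List Int → Nat → Int
  | [], _ => 0   -- Python would raise IndexError here; B only calls it on non-empty lists
  | a :: t, k =>
    let p := (a :: t).getD ((a :: t).length / 2) 0
    let lt := (a :: t).filter (fun x => decide (x < p))
    if k < lt.length then qselB lt k
    else
      let eqs := (a :: t).filter (fun x => decide (x = p))
      if k < lt.length + eqs.length then p
      else qselB ((a :: t).filter (fun x => decide (p < x))) (k - lt.length - eqs.length)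
termination_by xs _ => xs.length
decreasing_by
  all_goals
    have hp : (a :: t).getD ((a :: t).length / 2) 0 ∈ (a :: t) := by
      have h : (a :: t).length / 2 < (a :: t).length :=
        Nat.div_lt_self (by simp) (by norm_num)
      rw [List.getD_eq_getElem _ _ h]; exact List.getElem_mem h
  · exact List.length_filter_lt_length_iff_exists.mpr ⟨_, hp, by simp⟩
  · exact List.length_filter_lt_length_iff_exists.mpr ⟨_, hp, by simp⟩

def select_median_repetition_alt (run_data : List (String × List Int)) : Option (List (String × Option Int)) :=
  match (PySem.Dict.mk run_data).get? "Core cyc" with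
  | none => none                       -- run_data.get returns None
  | some core =>
    if core = [] then none             -- if not core
    else
      let median := qselB core ((core.length - 1) / 2)
      match PySem.List.index? core median with
      | none => none                   -- core.index would raise ValueError; never happens: median ∈ core
      | some idx => some (run_data.map (fun cv => (cv.1, cv.2[idx]?)))

-- ===== PRECONDITION & SPEC =====
def Spec_select_median_repetition (run_data : List (String × List Int)) (out : Option (List (String × Option Int))) : Prop := out = select_median_repetition_alt run_data
instance (run_data : List (String × List Int)) (out : Option (List (String × Option Int))) : Decidable (Spec_select_median_repetition run_data out) := by unfold Spec_select_median_repetition; infer_instance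

-- ===== CLAIM (what is proved, stated in full; the proofs are below) =====
def Claim_equal_select_median_repetition : Prop := ∀ (run_data : List (String × List Int)), Dom_select_median_repetition run_data → Spec_select_median_repetition run_data (select_median_repetition run_data)

-- ===== LEMMAS AND PROOFS =====

lemma pairwise_le_of_all_eq (p : Int) : ∀ (l : List Int), (∀ x ∈ l, x = p) → l.Pairwise (· ≤ ·) := by
  intro l
  induction l with
  | nil => intro _; exact List.Pairwise.nil
  | cons a t ih =>
    intro h
    refine List.Pairwise.cons ?_ (ih fun x hx => h x (List.mem_cons_of_mem _ hx))
    intro b hb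
    rw [h a (by simp), h b (List.mem_cons_of_mem _ hb)]

lemma getD_all_eq (p : Int) (l : List Int) (h : ∀ x ∈ l, x = p) (j : Nat)
    (hj : j < l.length) : l.getD j 0 = p := by
  rw [List.getD_eq_getElem _ _ hj]; exact h _ (List.getElem_mem hj)

-- sorted xs splits at any pivot p into sorted/below ++ equal ++ sorted/above
lemma sorted_split (xs : List Int) (p : Int) :
    PySem.List.sorted xs (fun x => x) =
      PySem.List.sorted (xs.filter (fun x => decide (x < p))) (fun x => x)
        ++ xs.filter (fun x => decide (x = p))
        ++ PySem.List.sorted (xs.filter (fun x => decide (p < x))) (fun x => x) := by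
  apply PySem.List.sorted_id_eq_of_perm_of_pairwise
  · -- permutation with xs
    have h1 := List.filter_append_perm (fun x => decide (x < p)) xs
    have h2 := List.filter_append_perm (fun x => decide (x = p))
        (xs.filter (fun x => !decide (x < p)))
    have he : (xs.filter (fun x => !decide (x < p))).filter (fun x => decide (x = p))
        = xs.filter (fun x => decide (x = p)) := by
      rw [List.filter_filter]
      apply List.filter_congr
      intro x _
      by_cases hx : x = p <;> simp [hx]
    have hg : (xs.filter (fun x => !decide (x < p))).filter (fun x => !decide (x = p))
        = xs.filter (fun x => decide (p < x)) := by
      rw [List.filter_filter]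
      apply List.filter_congr
      intro x _
      by_cases h1 : x = p
      · simp [h1]
      · by_cases h2 : x < p <;> simp [h1, h2] <;> omega
    rw [he, hg] at h2
    refine List.Perm.trans
      (((PySem.List.sorted_perm _ _ _).append (List.Perm.refl _)).append
        (PySem.List.sorted_perm _ _ _)) ?_
    rw [List.append_assoc]
    exact ((List.Perm.refl _).append h2).trans h1
  · -- pairwise ≤
    rw [List.pairwise_append, List.pairwise_append]
    refine ⟨⟨PySem.List.sorted_pairwise _ _, ?_, ?_⟩, PySem.List.sorted_pairwise _ _, ?_⟩
    · apply pairwise_le_of_all_eq p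
      intro x hx
      simpa using (List.mem_filter.mp hx).2
    · intro a ha b hb
      have ha' : a < p := by
        have := (List.mem_filter.mp ((PySem.List.mem_sorted _ _ _ _).mp ha)).2
        simpa using this
      have hb' : b = p := by simpa using (List.mem_filter.mp hb).2
      omega
    · intro a ha b hb
      have hb' : p < b := by
        have := (List.mem_filter.mp ((PySem.List.mem_sorted _ _ _ _).mp hb)).2
        simpa using this
      rcases List.mem_append.mp ha with ha | ha
      · have : a < p := by
          have := (List.mem_filter.mp ((PySem.List.mem_sorted _ _ _ _).mp ha)).2
          simpa using this
        omega
      · have : a = p := by simpa using (List.mem_filter.mp ha).2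
        omega

lemma qselB_correct : ∀ (n : Nat) (xs : List Int) (k : Nat), xs.length ≤ n → k < xs.length →
    qselB xs k = (PySem.List.sorted xs (fun x => x)).getD k 0 := by
  intro n
  induction n with
  | zero => intro xs k h hk; omega
  | succ n ih =>
    intro xs k h hk
    match xs with
    | [] => simp at hk
    | a :: t =>
      simp only [qselB]
      set p := (a :: t).getD ((a :: t).length / 2) 0 with hp_def
      have hp : p ∈ (a :: t) := by
        have hl2 : (a :: t).length / 2 < (a :: t).length :=
          Nat.div_lt_self (by simp) (by norm_num)
        rw [hp_def, List.getD_eq_getElem _ _ hl2]; exact List.getElem_mem hl2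
      set lt := (a :: t).filter (fun x => decide (x < p)) with hlt_def
      set eqs := (a :: t).filter (fun x => decide (x = p)) with heqs_def
      set gt := (a :: t).filter (fun x => decide (p < x)) with hgt_def
      have hsplit := sorted_split (a :: t) p
      rw [← hlt_def, ← heqs_def, ← hgt_def] at hsplit
      have hlen_lt : lt.length < (a :: t).length := by
        rw [hlt_def]
        exact List.length_filter_lt_length_iff_exists.mpr ⟨p, hp, by simp⟩
      have hlen_gt : gt.length < (a :: t).length := by
        rw [hgt_def]
        exact List.length_filter_lt_length_iff_exists.mpr ⟨p, hp, by simp⟩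
      have hlens : (a :: t).length = lt.length + eqs.length + gt.length := by
        have hl := congrArg List.length hsplit
        simp only [List.length_append, PySem.List.length_sorted] at hl
        omega
      have heqmem : ∀ x ∈ eqs, x = p := by
        intro x hx
        rw [heqs_def] at hx
        simpa using (List.mem_filter.mp hx).2
      by_cases h1 : k < lt.length
      · rw [if_pos h1, hsplit, List.getD_eq_getElem?_getD,
            List.getElem?_append_left (by
              simp only [List.length_append, PySem.List.length_sorted]; omega),
            List.getElem?_append_left (by
              simp only [PySem.List.length_sorted]; omega),
            ← List.getD_eq_getElem?_getD]
        exact ih lt k (by omega) h1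
      · rw [if_neg h1]
        by_cases h2 : k < lt.length + eqs.length
        · rw [if_pos h2, hsplit, List.getD_eq_getElem?_getD,
              List.getElem?_append_left (by
                simp only [List.length_append, PySem.List.length_sorted]; omega),
              List.getElem?_append_right (by
                simp only [PySem.List.length_sorted]; omega),
              ← List.getD_eq_getElem?_getD, PySem.List.length_sorted]
          exact (getD_all_eq p eqs heqmem _ (by omega)).symm
        · rw [if_neg h2, hsplit, List.getD_eq_getElem?_getD,
              List.getElem?_append_right (by
                simp only [List.length_append, PySem.List.length_sorted]; omega),
              ← List.getD_eq_getElem?_getD]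
          simp only [List.length_append, PySem.List.length_sorted]
          have hidx : k - (lt.length + eqs.length) = k - lt.length - eqs.length := by omega
          rw [hidx]
          exact ih gt _ (by omega) (by omega)

lemma findFirstA_eq (v : Int) : ∀ (xs : List Int) (i : Nat),
    findFirstA xs v i = (PySem.List.index? xs v).map (· + i) := by
  intro xs
  induction xs with
  | nil => intro i; simp [findFirstA, PySem.List.index?_eq_idxOf?]
  | cons x t ih =>
    intro i
    simp only [findFirstA]
    by_cases hx : x = v
    · subst hx
      rw [if_pos rfl, PySem.List.index?_cons_self]
      simp
    · rw [if_neg hx, PySem.List.index?_cons_of_ne _ hx, ih (i + 1), Option.map_map]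
      cases PySem.List.index? t v with
      | none => rfl
      | some j => simp only [Option.map_some, Function.comp_apply]; congr 1; omega

-- A's branchy median index equals the lower-median index (n-1)/2
lemma median_index_eq (n : Nat) (hn : 0 < n) :
    (if n % 2 = 0 then n / 2 - 1 else n / 2) = (n - 1) / 2 := by
  by_cases h : n % 2 = 0 <;> simp [h] <;> omega

-- ===== VERDICT (by name: the statement is the Claim_ definition above) =====
theorem select_median_repetition_spec : Claim_equal_select_median_repetition := by
  intro run_data _
  unfold Spec_select_median_repetition select_median_repetition select_median_repetition_alt
  cases hget : (PySem.Dict.mk run_data).get? "Core cyc" with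
  | none => rfl
  | some core =>
    simp only
    by_cases hc : core = []
    · simp [hc]
    · have hpos : 0 < core.length := List.length_pos_iff.mpr hc
      rw [if_neg hc, if_neg hc, if_neg (by omega)]
      have hslen : (PySem.List.sorted core (fun x => x)).length = core.length :=
        PySem.List.length_sorted _ _ _
      have hkey : (if (PySem.List.sorted core (fun x => x)).length % 2 = 0 then
            (PySem.List.sorted core (fun x => x)).getD
              ((PySem.List.sorted core (fun x => x)).length / 2 - 1) 0
          else (PySem.List.sorted core (fun x => x)).getD
              ((PySem.List.sorted core (fun x => x)).length / 2) 0)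
          = qselB core ((core.length - 1) / 2) := by
        rw [qselB_correct core.length core _ le_rfl (by omega), hslen,
            ← median_index_eq core.length hpos]
        by_cases h : core.length % 2 = 0 <;> simp [h]
      rw [hkey]
      set m := qselB core ((core.length - 1) / 2) with hm_def
      have hmem : m ∈ core := by
        have hk : (core.length - 1) / 2 < (PySem.List.sorted core (fun x => x)).length := by
          omega
        have hm : m = (PySem.List.sorted core (fun x => x))[(core.length - 1) / 2] := by
          rw [hm_def, qselB_correct core.length core _ le_rfl (by omega),
              List.getD_eq_getElem _ _ hk]
        rw [hm]
        exact (PySem.List.mem_sorted _ _ _ _).mp (List.getElem_mem hk)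
      obtain ⟨idx, hidx⟩ := Option.isSome_iff_exists.mp
        ((PySem.List.index?_isSome_iff core m).mpr hmem)
      rw [findFirstA_eq m core 0, hidx]
      simp only [Option.map_some]
      congr 1
      apply List.map_congr_left
      intro cv _
      by_cases hl : idx < cv.2.length
      · simp [hl]
      · simp [hl]
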